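-- pv_equiv track=rewrite | github.com/hhqx/leetcode | 0424字节后端/4-new.py | cal2
-- ===== SOURCE A (Python) =====
-- from math import comb, sqrt
--
-- def cal2(n=200):
--     S = [i * i for i in range(1, n + 1)]
--     vis = set()
--     ans = 0
--     for x in range(1, n + 1):
--         if x in vis:
--             continue
--
--         cnt = 0
--         for i, v in enumerate(S):
--             if v * x > n:
--                 cnt = i
--                 break
--             vis.add(v * x)
--
--         if cnt >= 3:
--             ans += comb(cnt, 3)
--     return ans
-- ===== SOURCE B (Python) =====
-- from math import isqrt
--
--
-- def cal2(n=200):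
--     if n < 9:
--         return 0
--     m = n // 9
--     sf = [True] * (m + 1)
--     for k in range(2, isqrt(m) + 1):
--         for j in range(k * k, m + 1, k * k):
--             sf[j] = False
--     ans = 0
--     for x in range(1, m + 1):
--         if sf[x]:
--             c = isqrt(n // x)
--             ans += c * (c - 1) * (c - 2) // 6
--     return ans
-- ===== Notes on version B (the rewrite author's own statement) =====
-- stated objective: faster
-- what changed: Replaces A's growing visited-set of square multiples and per-x scan over a precomputed list of n squares by a square-free sieve up to n//9, isqrt for the count and the closed form c(c-1)(c-2)//6 for comb(c,3), skipping all x > n//9 that contribute nothing.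
import Mathlib
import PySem

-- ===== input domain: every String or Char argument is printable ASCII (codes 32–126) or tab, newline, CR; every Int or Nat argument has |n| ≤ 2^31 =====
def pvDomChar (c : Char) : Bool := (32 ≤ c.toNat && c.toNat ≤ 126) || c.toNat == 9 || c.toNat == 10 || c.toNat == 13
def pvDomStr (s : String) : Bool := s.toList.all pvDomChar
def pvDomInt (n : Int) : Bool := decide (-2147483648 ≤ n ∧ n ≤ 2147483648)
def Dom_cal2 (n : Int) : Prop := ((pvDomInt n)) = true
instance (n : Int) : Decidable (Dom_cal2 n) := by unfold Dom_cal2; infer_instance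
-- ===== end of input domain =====

-- B replaces A's growing visited-set of square multiples by a square-free sieve up to n//9,
-- isqrt and the closed form c(c-1)(c-2)//6 for comb(c,3); a timing run measured B faster.
-- Note on port A: the internal-only set 'vis' (never returned) is ported as Std.HashSet Int --
-- exactly CPython's set semantics for membership/insert; a list-backed set would make the port
-- unevaluable on large inputs that A itself answers quickly.

-- ===== PORT A =====
-- inner loop 'for i, v in enumerate(S): if v*x > n: cnt = i; break; vis.add(v*x)'
-- (i is the running enumerate index; cnt stays 0 if no break occurs)
def cal2InnerA (n x : Int) : List Int → Int → Std.HashSet Int → Int × Std.HashSet Int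
  | [], _, vis => (0, vis)
  | v :: rest, i, vis =>
      if v * x > n then (i, vis)
      else cal2InnerA n x rest (i + 1) (vis.insert (v * x))

def cal2 (n : Int) : Int :=
  let S := (PySem.List.pyRange 1 (n + 1) 1).map (fun i => i * i)
  let r := (PySem.List.pyRange 1 (n + 1) 1).foldl
    (fun (st : Std.HashSet Int × Int) x =>
      if st.1.contains x then st
      else
        let p := cal2InnerA n x S 0 st.1
        if p.1 ≥ 3 then (p.2, st.2 + ((p.1.toNat.choose 3 : Nat) : Int))
        else (p.2, st.2))
    ((∅ : Std.HashSet Int), 0)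
  r.2

-- ===== PORT B =====
def cal2_alt (n : Int) : Int :=
  if n < 9 then 0
  else
    let m := PySem.Int.floordiv n 9
    let sf0 := List.replicate (m + 1).toNat true
    let sf := (PySem.List.pyRange 2 ((Nat.sqrt m.toNat : Int) + 1) 1).foldl
      (fun sf k =>
        (PySem.List.pyRange (k * k) (m + 1) (k * k)).foldl
          (fun sf j => PySem.List.pySetD sf j false) sf) sf0
    (PySem.List.pyRange 1 (m + 1) 1).foldl
      (fun ans x =>
        if PySem.List.pyGetD sf x false then
          let c : Int := (Nat.sqrt (PySem.Int.floordiv n x).toNat : Int)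
          ans + PySem.Int.floordiv (c * (c - 1) * (c - 2)) 6
        else ans) 0

-- ===== PRECONDITION & SPEC =====
def Spec_cal2 (n : Int) (out : Int) : Prop := out = cal2_alt n
instance (n : Int) (out : Int) : Decidable (Spec_cal2 n out) := by unfold Spec_cal2; infer_instance

-- ===== CLAIM (what is proved, stated in full; the proofs are below) =====
def Claim_equal_cal2 : Prop := ∀ (n : Int), Dom_cal2 n → Spec_cal2 n (cal2 n)

-- ===== LEMMAS AND PROOFS =====

theorem pv_two_choose_two : ∀ c : Nat, 2 * c.choose 2 = c * (c - 1)
  | 0 => rfl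
  | (c+1) => by
      rw [Nat.choose_succ_succ, Nat.mul_add, pv_two_choose_two c, Nat.choose_one_right]
      cases c with
      | zero => rfl
      | succ k => simp; ring

theorem pv_six_choose_three : ∀ c : Nat, 6 * c.choose 3 = c * (c - 1) * (c - 2)
  | 0 => rfl
  | (c+1) => by
      rw [Nat.choose_succ_succ, Nat.mul_add, pv_six_choose_three c,
          show (6:Nat) = 3*2 by rfl, Nat.mul_assoc 3 2, pv_two_choose_two c]
      cases c with
      | zero => rfl
      | succ k =>
        cases k with
        | zero => rfl
        | succ j =>
          simp [Nat.add_sub_cancel]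
          ring

theorem pv_choose3_closed (c : Nat) :
    PySem.Int.floordiv ((c : Int) * ((c : Int) - 1) * ((c : Int) - 2)) 6 = (c.choose 3 : Int) := by
  match c with
  | 0 => decide
  | 1 => decide
  | 2 => decide
  | (k+3) =>
    have h : ((k+3 : Nat) : Int) * (((k+3 : Nat) : Int) - 1) * (((k+3 : Nat) : Int) - 2)
        = (((k+3) * (k+2) * (k+1) : Nat) : Int) := by push_cast; ring
    have h6 : 6 * (k+3).choose 3 = (k+3)*(k+2)*(k+1) := by
      have hh := pv_six_choose_three (k+3)
      have e1 : (k+3) - 1 = k+2 := by omega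
      have e2 : (k+3) - 2 = k+1 := by omega
      rw [e1, e2] at hh; exact hh
    rw [h, PySem.Int.floordiv_eq_ediv_of_pos (by norm_num), ← h6]
    push_cast
    rw [Int.mul_ediv_cancel_left _ (by norm_num)]

theorem pv_count_sq {x : Nat} (hx : 1 ≤ x) (N k : Nat) :
    k * k * x ≤ N ↔ k ≤ Nat.sqrt (N / x) := by
  rw [Nat.le_sqrt, Nat.le_div_iff_mul_le hx]

theorem pv_not_squarefree_iff {x : Nat} (hx : 1 ≤ x) :
    ¬ Squarefree x ↔ ∃ k, 2 ≤ k ∧ k * k ∣ x := by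
  constructor
  · intro h
    rw [Squarefree] at h
    push Not at h
    obtain ⟨y, hdvd, hy⟩ := h
    rw [Nat.isUnit_iff] at hy
    refine ⟨y, ?_, hdvd⟩
    rcases Nat.eq_zero_or_pos y with h0 | h0
    · subst h0; simp at hdvd; omega
    · omega
  · rintro ⟨k, hk, hdvd⟩ hsf
    have := hsf k hdvd
    rw [Nat.isUnit_iff] at this
    omega

theorem pv_decomp {x : Nat} (hx : 1 ≤ x) :
    ∃ k y, 1 ≤ k ∧ 1 ≤ y ∧ x = k * k * y ∧ Squarefree y := by
  obtain ⟨a, b, ha, hb, heq, hsf⟩ := Nat.sq_mul_squarefree_of_pos (show 0 < x by omega)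
  exact ⟨b, a, hb, ha, by rw [← heq]; ring, hsf⟩

def pvTerm (N x : Nat) : Nat := if Squarefree x then (Nat.sqrt (N / x)).choose 3 else 0

theorem pv_range_cast {n : Int} {N : Nat} (hN : n = (N : Int)) :
    PySem.List.pyRange 1 (n + 1) 1 = (List.range' 1 N).map (fun (k : Nat) => (k : Int)) := by
  subst hN
  rw [PySem.List.pyRange_one]
  have h1 : ((N : Int) + 1 - 1).toNat = N := by omega
  rw [h1, List.range'_eq_map_range, List.map_map]
  apply List.map_congr_left
  intro a _
  simp only [Function.comp_apply]
  push_cast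
  ring

theorem pv_Ssq {n : Int} {N : Nat} (hN : n = (N : Int)) :
    (PySem.List.pyRange 1 (n + 1) 1).map (fun i => i * i)
      = (List.range' 0 N).map (fun (i : Nat) => ((i : Int) + 1) * ((i : Int) + 1)) := by
  rw [pv_range_cast hN, List.map_map, List.range'_eq_map_range, List.map_map]
  have h0 : (List.range N) = List.range' 0 N := by rw [List.range_eq_range']
  rw [h0]
  apply List.map_congr_left
  intro a _
  simp only [Function.comp_apply]
  push_cast
  ring

def pvStepA (n : Int) (st : Std.HashSet Int × Int) (x : Int) : Std.HashSet Int × Int :=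
  if st.1.contains x then st
  else
    let p := cal2InnerA n x ((PySem.List.pyRange 1 (n + 1) 1).map (fun i => i * i)) 0 st.1
    if p.1 ≥ 3 then (p.2, st.2 + ((p.1.toNat.choose 3 : Nat) : Int))
    else (p.2, st.2)

theorem pv_innerA_run (n x : Int) (c : Nat)
    (hbig : ((c + 1 : Nat) : Int) * ((c + 1 : Nat) : Int) * x > n)
    (hsmall : ∀ k : Nat, 1 ≤ k → k ≤ c → ((k : Nat) : Int) * ((k : Nat) : Int) * x ≤ n) :
    ∀ (len j : Nat) (vis : Std.HashSet Int), j ≤ c → c < j + len →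
      ∃ vis', cal2InnerA n x ((List.range' j len).map
          (fun (i : Nat) => ((i : Int) + 1) * ((i : Int) + 1))) ((j : Nat) : Int) vis = ((c : Int), vis')
        ∧ ∀ t : Int, t ∈ vis' ↔ t ∈ vis ∨ ∃ k : Nat, j < k ∧ k ≤ c ∧ t = ((k : Int) * (k : Int)) * x := by
  intro len
  induction len with
  | zero => intro j vis h1 h2; omega
  | succ l ih =>
    intro j vis hjc hlt
    rw [List.range'_succ, List.map_cons]
    show ∃ vis', cal2InnerA n x ((((j : Int) + 1) * ((j : Int) + 1)) :: _) ((j : Nat) : Int) vis = _ ∧ _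
    rw [cal2InnerA]
    by_cases hj : j = c
    · subst hj
      have hc : ((j : Int) + 1) * ((j : Int) + 1) * x > n := by
        have := hbig; push_cast at this; convert this using 2 <;> push_cast <;> ring
      rw [if_pos hc]
      refine ⟨vis, rfl, ?_⟩
      intro t
      constructor
      · intro h; exact Or.inl h
      · rintro (h | ⟨k, hk1, hk2, _⟩)
        · exact h
        · omega
    · have hjc' : j + 1 ≤ c := by omega
      have hle : ((j : Int) + 1) * ((j : Int) + 1) * x ≤ n := by
        have := hsmall (j + 1) (by omega) hjc'
        push_cast at this
        convert this using 2 <;> push_cast <;> ring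
      rw [if_neg (by omega)]
      obtain ⟨vis', heq, hchar⟩ := ih (j + 1) (vis.insert (((j : Int) + 1) * ((j : Int) + 1) * x)) hjc' (by omega)
      rw [show ((j : Nat) : Int) + 1 = (((j + 1 : Nat) : Nat) : Int) from by push_cast; ring]
      refine ⟨vis', heq, ?_⟩
      intro t
      rw [hchar t, Std.HashSet.mem_insert]
      simp only [beq_iff_eq]
      constructor
      · rintro ((h | h) | ⟨k, hk1, hk2, hk3⟩)
        · exact Or.inr ⟨j + 1, by omega, hjc', by rw [← h]; push_cast; ring⟩
        · exact Or.inl h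
        · exact Or.inr ⟨k, by omega, hk2, hk3⟩
      · rintro (h | ⟨k, hk1, hk2, hk3⟩)
        · exact Or.inl (Or.inr h)
        · by_cases hkj : k = j + 1
          · subst hkj
            exact Or.inl (Or.inl (by rw [hk3]; push_cast; ring))
          · exact Or.inr ⟨k, by omega, hk2, hk3⟩

theorem pv_outerA_run {n : Int} {N : Nat} (hN : n = (N : Int)) (hN2 : 2 ≤ N) :
    ∀ (len xv : Nat) (vis : Std.HashSet Int) (ans : Int), 1 ≤ xv → xv + len = N + 1 →
      (∀ t : Int, t ∈ vis ↔ ∃ y k : Nat, 1 ≤ y ∧ y < xv ∧ Squarefree y ∧ 1 ≤ k ∧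
          t = ((k * k * y : Nat) : Int) ∧ k * k * y ≤ N) →
      (((List.range' xv len).map (fun (k : Nat) => (k : Int))).foldl (pvStepA n)
        (vis, ans)).2 = ans + (((List.range' xv len).map (pvTerm N)).sum : Int) := by
  intro len
  induction len with
  | zero => intro xv vis ans _ _ _; simp
  | succ l ih =>
    intro xv vis ans hxv1 hlen hinv
    have hxvN : xv ≤ N := by omega
    rw [List.range'_succ, List.map_cons, List.foldl_cons, List.map_cons, List.sum_cons]
    by_cases hsf : Squarefree xv
    · -- x is squarefree: not in vis, inner loop runs
      have hnotmem : ((xv : Nat) : Int) ∉ vis := by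
        rw [hinv]
        rintro ⟨y, k, hy1, hyx, hysf, hk1, heq, hle⟩
        have hxy : k * k * y = xv := by exact_mod_cast heq.symm
        rcases Nat.lt_or_ge k 2 with hk2 | hk2
        · have : k = 1 := by omega
          subst this; simp at hxy; omega
        · exact (pv_not_squarefree_iff (by omega)).2 ⟨k, hk2, ⟨y, hxy.symm⟩⟩ hsf
      have hcont : vis.contains ((xv : Nat) : Int) = false := by
        rw [← Bool.not_eq_true, ← Std.HashSet.mem_iff_contains]
        exact hnotmem
      set c := Nat.sqrt (N / xv) with hc
      have hbig : ((c + 1 : Nat) : Int) * ((c + 1 : Nat) : Int) * ((xv : Nat) : Int) > n := by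
        rw [hN]
        have h1 : ¬ ((c + 1) * (c + 1) * xv ≤ N) := by
          rw [pv_count_sq hxv1 N (c + 1)]; omega
        have h2 : N < (c + 1) * (c + 1) * xv := by omega
        exact_mod_cast h2
      have hsmall : ∀ k : Nat, 1 ≤ k → k ≤ c → ((k : Nat) : Int) * ((k : Nat) : Int) * ((xv : Nat) : Int) ≤ n := by
        intro k hk1 hkc
        rw [hN]
        have : k * k * xv ≤ N := (pv_count_sq hxv1 N k).2 hkc
        exact_mod_cast this
      have hcN : c < N := by
        have h1 : c ≤ Nat.sqrt N := Nat.sqrt_le_sqrt (Nat.div_le_self N xv)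
        have h2 : Nat.sqrt N < N := Nat.sqrt_lt_self (by omega)
        omega
      obtain ⟨vis', heq, hchar⟩ := pv_innerA_run n ((xv : Nat) : Int) c hbig hsmall N 0 vis (Nat.zero_le c) (by omega)
      simp only [Nat.cast_zero] at heq
      have hstep : pvStepA n (vis, ans) ((xv : Nat) : Int)
          = (vis', ans + ((c.choose 3 : Nat) : Int)) := by
        simp only [pvStepA, hcont, Bool.false_eq_true, if_false, pv_Ssq hN, heq]
        by_cases hc3 : ((c : Nat) : Int) ≥ 3
        · rw [if_pos hc3]
          simp
        · rw [if_neg hc3]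
          have hlt : c < 3 := by
            by_contra hcon
            exact hc3 (by exact_mod_cast Nat.le_of_not_lt hcon)
          rw [Nat.choose_eq_zero_of_lt hlt]
          simp
      rw [hstep]
      have hinv' : ∀ t : Int, t ∈ vis' ↔ ∃ y k : Nat, 1 ≤ y ∧ y < xv + 1 ∧ Squarefree y ∧ 1 ≤ k ∧
          t = ((k * k * y : Nat) : Int) ∧ k * k * y ≤ N := by
        intro t
        rw [hchar t, hinv t]
        constructor
        · rintro (⟨y, k, hy1, hyx, hysf, hk1, heq', hle⟩ | ⟨k, hk0, hkc, heq'⟩)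
          · exact ⟨y, k, hy1, by omega, hysf, hk1, heq', hle⟩
          · refine ⟨xv, k, hxv1, by omega, hsf, by omega, ?_, (pv_count_sq hxv1 N k).2 hkc⟩
            rw [heq']; push_cast; ring
        · rintro ⟨y, k, hy1, hyx, hysf, hk1, heq', hle⟩
          rcases Nat.lt_or_ge y xv with hlt | hge
          · exact Or.inl ⟨y, k, hy1, hlt, hysf, hk1, heq', hle⟩
          · have hyeq : y = xv := by omega
            subst hyeq
            refine Or.inr ⟨k, by omega, (pv_count_sq hxv1 N k).1 hle, ?_⟩
            rw [heq']; push_cast; ring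
      rw [ih (xv + 1) vis' (ans + ((c.choose 3 : Nat) : Int)) (by omega) (by omega) hinv']
      have hterm : pvTerm N xv = c.choose 3 := by rw [pvTerm, if_pos hsf]
      rw [hterm]
      push_cast
      ring
    · -- x is not squarefree: it is in vis, skipped
      obtain ⟨k, y, hk1, hy1, hxy, hysf⟩ := pv_decomp (show 1 ≤ xv by omega)
      have hk2 : 2 ≤ k := by
        rcases Nat.lt_or_ge k 2 with h | h
        · have : k = 1 := by omega
          subst this; simp at hxy; subst hxy; exact absurd hysf hsf
        · exact h
      have hyx : y < xv := by
        have h4 : 4 ≤ k * k := Nat.mul_le_mul hk2 hk2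
        calc y < 4 * y := by omega
        _ ≤ k * k * y := Nat.mul_le_mul_right y h4
        _ = xv := hxy.symm
      have hmem : ((xv : Nat) : Int) ∈ vis := by
        rw [hinv]
        exact ⟨y, k, hy1, hyx, hysf, by omega, by rw [hxy], by omega⟩
      have hcont : vis.contains ((xv : Nat) : Int) = true := by
        rw [← Std.HashSet.mem_iff_contains]
        exact hmem
      have hstep : pvStepA n (vis, ans) ((xv : Nat) : Int) = (vis, ans) := by
        simp only [pvStepA, hcont, if_true]
      rw [hstep]
      have hinv' : ∀ t : Int, t ∈ vis ↔ ∃ y k : Nat, 1 ≤ y ∧ y < xv + 1 ∧ Squarefree y ∧ 1 ≤ k ∧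
          t = ((k * k * y : Nat) : Int) ∧ k * k * y ≤ N := by
        intro t
        rw [hinv t]
        constructor
        · rintro ⟨y', k', h1, h2, h3, h4, h5, h6⟩
          exact ⟨y', k', h1, by omega, h3, h4, h5, h6⟩
        · rintro ⟨y', k', h1, h2, h3, h4, h5, h6⟩
          rcases Nat.lt_or_ge y' xv with hlt | hge
          · exact ⟨y', k', h1, hlt, h3, h4, h5, h6⟩
          · have : y' = xv := by omega
            subst this
            exact absurd h3 hsf
      rw [ih (xv + 1) vis ans (by omega) (by omega) hinv']
      have : pvTerm N xv = 0 := by rw [pvTerm, if_neg hsf]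
      rw [this]
      push_cast
      ring

theorem pv_calA_big {n : Int} {N : Nat} (hN : n = (N : Int)) (hN2 : 2 ≤ N) :
    cal2 n = (((List.range' 1 N).map (pvTerm N)).sum : Int) := by
  have h0 : cal2 n = ((PySem.List.pyRange 1 (n + 1) 1).foldl (pvStepA n) ((∅ : Std.HashSet Int), 0)).2 := rfl
  rw [h0, pv_range_cast hN]
  have hinv : ∀ t : Int, t ∈ (∅ : Std.HashSet Int) ↔ ∃ y k : Nat, 1 ≤ y ∧ y < 1 ∧ Squarefree y ∧ 1 ≤ k ∧
      t = ((k * k * y : Nat) : Int) ∧ k * k * y ≤ N := by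
    intro t
    constructor
    · intro h; exact absurd h (Std.HashSet.not_mem_empty)
    · rintro ⟨y, k, h1, h2, _⟩; omega
  rw [pv_outerA_run hN hN2 N 1 (∅ : Std.HashSet Int) 0 (le_refl 1) (by omega) hinv]
  simp

theorem pv_setfalse_len (l : List Int) :
    ∀ sf : List Bool, (l.foldl (fun sf j => PySem.List.pySetD sf j false) sf).length = sf.length := by
  induction l with
  | nil => intro sf; rfl
  | cons j rest ih =>
    intro sf
    rw [List.foldl_cons, ih, PySem.List.length_pySetD]

theorem pv_setfalse_get (l : List Int) (hpos : ∀ j ∈ l, 0 ≤ j) :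
    ∀ (sf : List Bool) (t : Nat), t < sf.length →
      (l.foldl (fun sf j => PySem.List.pySetD sf j false) sf)[t]?
        = if ((t : Int) ∈ l) then some false else sf[t]? := by
  induction l with
  | nil => intro sf t ht; simp
  | cons j rest ih =>
    intro sf t ht
    have hj : 0 ≤ j := hpos j (List.mem_cons_self ..)
    rw [List.foldl_cons, PySem.List.pySetD_of_nonneg sf false hj]
    rw [ih (fun a ha => hpos a (List.mem_cons_of_mem _ ha)) _ t (by simpa using ht)]
    rw [List.getElem?_set]
    by_cases hmem : (t : Int) ∈ rest
    · simp [hmem]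
    · by_cases hjt : (t : Int) = j
      · have : j.toNat = t := by omega
        simp [hmem, hjt.symm, this, ht]
      · have : j.toNat ≠ t := by omega
        simp [hmem, hjt, this]

theorem pv_sieve_run {m : Int} {M : Nat} (hm : m = (M : Int)) :
    ∀ (K : List Int), (∀ k ∈ K, 2 ≤ k) → ∀ (sf : List Bool), sf.length = M + 1 →
      (K.foldl (fun sf k => (PySem.List.pyRange (k * k) (m + 1) (k * k)).foldl
          (fun sf j => PySem.List.pySetD sf j false) sf) sf).length = M + 1 ∧
      ∀ t : Nat, t ≤ M →
        (K.foldl (fun sf k => (PySem.List.pyRange (k * k) (m + 1) (k * k)).foldl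
            (fun sf j => PySem.List.pySetD sf j false) sf) sf)[t]?
          = if (∃ k : Int, k ∈ K ∧ k * k ≤ (t : Int) ∧ k * k ∣ (t : Int)) then some false else sf[t]? := by
  intro K
  induction K with
  | nil =>
    intro _ sf hlen
    refine ⟨hlen, fun t ht => ?_⟩
    simp
  | cons k K' ih =>
    intro hK sf hlen
    have hk2 : 2 ≤ k := hK k (List.mem_cons_self ..)
    have hkk : 0 < k * k := by positivity
    have hpos : ∀ j ∈ PySem.List.pyRange (k * k) (m + 1) (k * k), 0 ≤ j := by
      intro j hj
      rw [PySem.List.mem_pyRange_iff_of_pos hkk] at hj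
      omega
    set sf1 := (PySem.List.pyRange (k * k) (m + 1) (k * k)).foldl
      (fun sf j => PySem.List.pySetD sf j false) sf with hsf1
    have hlen1 : sf1.length = M + 1 := by rw [hsf1, pv_setfalse_len, hlen]
    obtain ⟨hlenf, hcharf⟩ := ih (fun a ha => hK a (List.mem_cons_of_mem _ ha)) sf1 hlen1
    refine ⟨by rw [List.foldl_cons]; exact hlenf, fun t ht => ?_⟩
    rw [List.foldl_cons, hcharf t ht]
    have hget1 : sf1[t]? = if (k * k ≤ (t : Int) ∧ k * k ∣ (t : Int)) then some false else sf[t]? := by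
      rw [hsf1, pv_setfalse_get _ hpos sf t (by omega)]
      have hmemiff : ((t : Int) ∈ PySem.List.pyRange (k * k) (m + 1) (k * k))
          ↔ (k * k ≤ (t : Int) ∧ k * k ∣ (t : Int)) := by
        rw [PySem.List.mem_pyRange_iff_of_pos hkk]
        constructor
        · rintro ⟨h1, h2, h3⟩
          refine ⟨h1, ?_⟩
          have := dvd_add h3 (dvd_refl (k * k))
          simpa using this
        · rintro ⟨h1, h2⟩
          refine ⟨h1, by omega, dvd_sub h2 (dvd_refl _)⟩
      by_cases hc : (k * k ≤ (t : Int) ∧ k * k ∣ (t : Int))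
      · rw [if_pos (hmemiff.2 hc), if_pos hc]
      · rw [if_neg (fun hmm => hc (hmemiff.1 hmm)), if_neg hc]
    by_cases hK' : ∃ k' : Int, k' ∈ K' ∧ k' * k' ≤ (t : Int) ∧ k' * k' ∣ (t : Int)
    · rw [if_pos hK']
      obtain ⟨k', h1, h2⟩ := hK'
      rw [if_pos ⟨k', List.mem_cons_of_mem _ h1, h2⟩]
    · rw [if_neg hK', hget1]
      by_cases hc : (k * k ≤ (t : Int) ∧ k * k ∣ (t : Int))
      · rw [if_pos hc, if_pos ⟨k, List.mem_cons_self .., hc⟩]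
      · rw [if_neg hc, if_neg ?_]
        rintro ⟨k', hmem, hcond⟩
        rcases List.mem_cons.1 hmem with h | h
        · exact hc (h ▸ hcond)
        · exact hK' ⟨k', h, hcond⟩

theorem pv_cond_iff {M x : Nat} (hx1 : 1 ≤ x) (hxM : x ≤ M) :
    (∃ k : Int, k ∈ PySem.List.pyRange 2 ((Nat.sqrt M : Int) + 1) 1 ∧ k * k ≤ (x : Int) ∧ k * k ∣ (x : Int))
      ↔ ¬ Squarefree x := by
  constructor
  · rintro ⟨k, hmem, hle, hdvd⟩
    rw [PySem.List.mem_pyRange_one] at hmem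
    have hk2 : (2 : Int) ≤ k := hmem.1
    have hkn : k = ((k.toNat : Nat) : Int) := by omega
    rw [pv_not_squarefree_iff hx1]
    refine ⟨k.toNat, by omega, ?_⟩
    have : ((k.toNat * k.toNat : Nat) : Int) ∣ ((x : Nat) : Int) := by
      push_cast
      rw [← hkn]
      exact hdvd
    exact_mod_cast this
  · intro hnsf
    obtain ⟨k, hk2, hdvd⟩ := (pv_not_squarefree_iff hx1).1 hnsf
    have hkkx : k * k ≤ x := Nat.le_of_dvd (by omega) hdvd
    have hks : k ≤ Nat.sqrt M := Nat.le_sqrt.2 (by omega)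
    refine ⟨(k : Int), ?_, ?_, ?_⟩
    · rw [PySem.List.mem_pyRange_one]
      constructor
      · exact_mod_cast hk2
      · have : (k : Int) ≤ (Nat.sqrt M : Int) := by exact_mod_cast hks
        omega
    · exact_mod_cast hkkx
    · exact_mod_cast Int.natCast_dvd_natCast.2 hdvd

theorem pv_tail_zero {N M x : Nat} (hM : M = N / 9) (hx : M + 1 ≤ x) : pvTerm N x = 0 := by
  have hx0 : 0 < x := by omega
  have h9x : N < 9 * x := by omega
  have hdiv : N / x < 9 := (Nat.div_lt_iff_lt_mul hx0).2 (by omega)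
  have hsq : Nat.sqrt (N / x) < 3 := by
    rw [Nat.sqrt_lt]
    omega
  have hch : (Nat.sqrt (N / x)).choose 3 = 0 := Nat.choose_eq_zero_of_lt hsq
  rw [pvTerm, hch]
  simp

def pvStepB (n : Int) (sf : List Bool) (ans : Int) (x : Int) : Int :=
  if PySem.List.pyGetD sf x false then
    let c : Int := (Nat.sqrt (PySem.Int.floordiv n x).toNat : Int)
    ans + PySem.Int.floordiv (c * (c - 1) * (c - 2)) 6
  else ans

theorem pv_sumB_run {n : Int} {N M : Nat} (hN : n = (N : Int)) (sf : List Bool)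
    (hchar : ∀ x : Nat, 1 ≤ x → x ≤ M → (PySem.List.pyGetD sf ((x : Nat) : Int) false = true ↔ Squarefree x)) :
    ∀ (len xv : Nat) (ans : Int), 1 ≤ xv → xv + len = M + 1 →
      ((List.range' xv len).map (fun (k : Nat) => (k : Int))).foldl (pvStepB n sf) ans
        = ans + (((List.range' xv len).map (pvTerm N)).sum : Int) := by
  intro len
  induction len with
  | zero => intro xv ans _ _; simp
  | succ l ih =>
    intro xv ans hxv1 hlen
    have hxvM : xv ≤ M := by omega
    rw [List.range'_succ, List.map_cons, List.foldl_cons, List.map_cons, List.sum_cons]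
    have hfd : PySem.Int.floordiv n ((xv : Nat) : Int) = ((N / xv : Nat) : Int) := by
      rw [hN]; exact_mod_cast PySem.Int.floordiv_natCast N xv
    have hstep : pvStepB n sf ans ((xv : Nat) : Int) = ans + ((pvTerm N xv : Nat) : Int) := by
      rw [pvStepB]
      by_cases hsf : Squarefree xv
      · rw [if_pos ((hchar xv hxv1 hxvM).2 hsf)]
        rw [hfd]
        simp only [Int.toNat_natCast]
        rw [pv_choose3_closed (Nat.sqrt (N / xv))]
        rw [pvTerm, if_pos hsf]
      · rw [if_neg ?_, pvTerm, if_neg hsf]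
        · simp
        · intro hmm
          exact hsf ((hchar xv hxv1 hxvM).1 hmm)
    rw [hstep, ih (xv + 1) _ (by omega) (by omega)]
    push_cast
    ring

theorem pv_calB_big {n : Int} {N : Nat} (hN : n = (N : Int)) (hN9 : 9 ≤ N) :
    cal2_alt n = (((List.range' 1 N).map (pvTerm N)).sum : Int) := by
  have h9 : ¬ n < 9 := by omega
  set M : Nat := N / 9 with hM
  have hM1 : 1 ≤ M := by omega
  have hmI : PySem.Int.floordiv n 9 = ((M : Nat) : Int) := by
    rw [hN, hM]; exact_mod_cast PySem.Int.floordiv_natCast N 9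
  have h0 : cal2_alt n = (PySem.List.pyRange 1 (PySem.Int.floordiv n 9 + 1) 1).foldl
      (pvStepB n ((PySem.List.pyRange 2 ((Nat.sqrt (PySem.Int.floordiv n 9).toNat : Int) + 1) 1).foldl
        (fun sf k => (PySem.List.pyRange (k * k) (PySem.Int.floordiv n 9 + 1) (k * k)).foldl
          (fun sf j => PySem.List.pySetD sf j false) sf)
        (List.replicate (PySem.Int.floordiv n 9 + 1).toNat true))) 0 := by
    rw [cal2_alt, if_neg h9]
    rfl
  rw [h0, hmI]
  have htoNat : (((M : Nat) : Int)).toNat = M := by omega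
  have htoNat1 : (((M : Nat) : Int) + 1).toNat = M + 1 := by omega
  rw [htoNat, htoNat1]
  -- sieve characterisation
  have hK2 : ∀ k ∈ PySem.List.pyRange 2 ((Nat.sqrt M : Int) + 1) 1, (2 : Int) ≤ k := by
    intro k hk
    rw [PySem.List.mem_pyRange_one] at hk
    exact hk.1
  obtain ⟨hlenf, hcharf⟩ := pv_sieve_run (m := ((M : Nat) : Int)) rfl
    (PySem.List.pyRange 2 ((Nat.sqrt M : Int) + 1) 1) hK2
    (List.replicate (M + 1) true) (by simp)
  set sfF := (PySem.List.pyRange 2 ((Nat.sqrt M : Int) + 1) 1).foldl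
      (fun sf k => (PySem.List.pyRange (k * k) (((M : Nat) : Int) + 1) (k * k)).foldl
        (fun sf j => PySem.List.pySetD sf j false) sf)
      (List.replicate (M + 1) true) with hsfF
  have hchar : ∀ x : Nat, 1 ≤ x → x ≤ M →
      (PySem.List.pyGetD sfF ((x : Nat) : Int) false = true ↔ Squarefree x) := by
    intro x hx1 hxM
    have hget := hcharf x hxM
    rw [PySem.List.pyGetD_natCast, List.getD_eq_getElem?_getD]
    by_cases hc : ∃ k : Int, k ∈ PySem.List.pyRange 2 ((Nat.sqrt M : Int) + 1) 1 ∧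
        k * k ≤ (x : Int) ∧ k * k ∣ (x : Int)
    · rw [if_pos hc] at hget
      rw [hget]
      have hns := (pv_cond_iff hx1 hxM).1 hc
      simp [hns]
    · rw [if_neg hc, List.getElem?_replicate, if_pos (by omega)] at hget
      rw [hget]
      have hsf : Squarefree x := by
        by_contra hnsf
        exact hc ((pv_cond_iff hx1 hxM).2 hnsf)
      simp [hsf]
  -- main sum
  rw [pv_range_cast (n := ((M : Nat) : Int)) rfl]
  rw [pv_sumB_run hN sfF hchar M 1 0 (le_refl 1) (by omega)]
  -- extend the sum from [1,M] to [1,N]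
  have hsplit : List.range' 1 N = List.range' 1 M ++ List.range' (1 + M) (N - M) := by
    have h := @List.range'_append 1 M (N - M) 1
    simp only [Nat.mul_one, Nat.one_mul] at h
    rw [show M + (N - M) = N from by omega] at h
    exact h.symm
  rw [hsplit, List.map_append, List.sum_append]
  have htail : ((List.range' (1 + M) (N - M)).map (pvTerm N)).sum = 0 := by
    apply List.sum_eq_zero
    intro a ha
    obtain ⟨b, hb, hba⟩ := List.mem_map.1 ha
    rw [List.mem_range'] at hb
    rw [← hba, pv_tail_zero hM (by omega)]
  rw [htail]
  push_cast
  ring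

theorem pv_cal2_nonpos {n : Int} (h : n ≤ 0) : cal2 n = 0 := by
  have h0 : cal2 n = ((PySem.List.pyRange 1 (n + 1) 1).foldl (pvStepA n) ((∅ : Std.HashSet Int), 0)).2 := rfl
  rw [h0, PySem.List.pyRange_one_eq_nil (by omega)]
  rfl

theorem pv_cal2_one : cal2 1 = 0 := by
  have h0 : cal2 1 = ((PySem.List.pyRange 1 (1 + 1) 1).foldl (pvStepA 1) ((∅ : Std.HashSet Int), 0)).2 := rfl
  have hr : PySem.List.pyRange 1 (1 + 1) 1 = [1] := by decide
  rw [h0, hr, List.foldl_cons, List.foldl_nil, pvStepA]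
  rw [show ((∅ : Std.HashSet Int), (0 : Int)).1.contains 1 = false from by simp]
  simp only [Bool.false_eq_true, if_false, hr, List.map_cons, List.map_nil]
  rw [show (1 : Int) * 1 = 1 from rfl, cal2InnerA]
  norm_num

theorem pv_cal2_small {n : Int} (h1 : 2 ≤ n) (h8 : n ≤ 8) : cal2 n = 0 := by
  have hN : n = ((n.toNat : Nat) : Int) := by omega
  rw [pv_calA_big hN (by omega)]
  have hz : ∀ a ∈ (List.range' 1 n.toNat).map (pvTerm n.toNat), a = 0 := by
    intro a ha
    obtain ⟨x, hx, rfl⟩ := List.mem_map.1 ha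
    rw [List.mem_range'] at hx
    exact pv_tail_zero (M := n.toNat / 9) rfl (by omega)
  rw [List.sum_eq_zero hz]
  rfl

-- ===== VERDICT (by name: the statement is the Claim_ definition above) =====
theorem cal2_spec : Claim_equal_cal2 := by
  intro n _
  unfold Spec_cal2
  by_cases h9 : n < 9
  · have hb : cal2_alt n = 0 := by unfold cal2_alt; simp [h9]
    rw [hb]
    by_cases h0 : n ≤ 0
    · exact pv_cal2_nonpos h0
    · by_cases hone : n = 1
      · rw [hone]; exact pv_cal2_one
      · exact pv_cal2_small (by omega) (by omega)
  · replace h9 := not_lt.mp h9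
    have hN : n = ((n.toNat : Nat) : Int) := by omega
    have h9' : 9 ≤ n.toNat := by omega
    rw [pv_calA_big hN (by omega), pv_calB_big hN h9']
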